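-- pv_equiv track=rewrite | github.com/zbanderson/briarwood | briarwood/eval/operational_sweep.py | _bullet_block_after
-- ===== SOURCE A (Python) =====
-- def _bullet_block_after(text: str, heading: str) -> list[str]:
--     if heading not in text:
--         return []
--     section = text.split(heading, 1)[1]
--     lines: list[str] = []
--     for raw_line in section.splitlines():
--         line = raw_line.strip()
--         if not line:
--             if lines:
--                 break
--             continue
--         if not line.startswith("- "):
--             if lines:
--                 break
--             continue
--         lines.append(line[2:])
--     return lines
-- ===== SOURCE B (Python) =====
-- def _bullet_block_after(text: str, heading: str) -> list[str]:
--     if heading not in text: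
--         return []
--     section = text.split(heading, 1)[1]
--     stripped = [raw.strip() for raw in section.splitlines()]
--     # drop the preamble: everything before the first bullet line
--     while stripped and not stripped[0].startswith("- "):
--         stripped = stripped[1:]
--     # take the contiguous bullet run
--     block = []
--     for l in stripped:
--         if not l.startswith("- "):
--             break
--         block.append(l[2:])
--     return block
-- ===== Notes on version B (the rewrite author's own statement) =====
-- stated objective: simpler
-- what changed: A's single loop with accumulator state and break/continue control is replaced by two single-purpose phases: drop the stripped lines before the first bullet, then take the contiguous bullet run and slice off the '- ' prefix.
import Mathlib
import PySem

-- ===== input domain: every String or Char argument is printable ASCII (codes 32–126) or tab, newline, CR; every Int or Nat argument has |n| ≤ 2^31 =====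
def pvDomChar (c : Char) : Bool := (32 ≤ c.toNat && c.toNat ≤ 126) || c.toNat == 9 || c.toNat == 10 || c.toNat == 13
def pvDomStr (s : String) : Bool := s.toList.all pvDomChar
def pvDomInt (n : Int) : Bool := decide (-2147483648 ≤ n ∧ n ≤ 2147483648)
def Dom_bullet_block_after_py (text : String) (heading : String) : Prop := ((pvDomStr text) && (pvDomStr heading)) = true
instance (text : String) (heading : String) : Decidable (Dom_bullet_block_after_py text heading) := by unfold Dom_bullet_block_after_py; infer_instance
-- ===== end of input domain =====

-- B replaces A's single accumulator loop with break/continue by two phases (drop the preamble, take the bullet run): simpler control flow, same cost.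

-- ===== PORT A =====
-- A's for-loop over section.splitlines() with the accumulator `lines` and break/continue
def bbaLoopA : List String → List String → List String
  | [], lines => lines
  | raw :: rest, lines =>
    let line := PySem.Str.strip raw
    if line = "" then
      (if lines ≠ [] then lines else bbaLoopA rest lines)
    else if PySem.Str.startswith line "- " = false then
      (if lines ≠ [] then lines else bbaLoopA rest lines)
    else bbaLoopA rest (lines ++ [PySem.Str.slice line (some 2) none])

def bullet_block_after_py (text : String) (heading : String) : List String :=
  if PySem.Str.isIn heading text = false then []
  else
    -- text.split(heading, 1)[1]; the getD defaults never fire under Pre_ (heading ≠ "" and heading in text)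
    let parts := (PySem.Str.splitMax? text heading 1).getD []
    let sect := (PySem.List.pyGet? parts 1).getD ""
    bbaLoopA (PySem.Str.splitlines sect) []

-- ===== PORT B =====
-- while stripped and not stripped[0].startswith("- "): stripped = stripped[1:]
def bbaDrop : List String → List String
  | [] => []
  | l :: rest => if PySem.Str.startswith l "- " = false then bbaDrop rest else l :: rest

-- for l in stripped: if not l.startswith("- "): break; block.append(l[2:])
def bbaTake : List String → List String
  | [] => []
  | l :: rest =>
    if PySem.Str.startswith l "- " = false then []
    else PySem.Str.slice l (some 2) none :: bbaTake rest

def bullet_block_after_py_alt (text : String) (heading : String) : List String :=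
  if PySem.Str.isIn heading text = false then []
  else
    let parts := (PySem.Str.splitMax? text heading 1).getD []
    let sect := (PySem.List.pyGet? parts 1).getD ""
    let stripped := (PySem.Str.splitlines sect).map PySem.Str.strip
    bbaTake (bbaDrop stripped)

-- ===== PRECONDITION & SPEC =====
-- Pre_ excludes only heading = "", where A (and B alike) raise ValueError from text.split("", 1).
def Pre_bullet_block_after_py (text : String) (heading : String) : Prop := heading ≠ ""
instance (text : String) (heading : String) : Decidable (Pre_bullet_block_after_py text heading) := by unfold Pre_bullet_block_after_py; infer_instance
def pvWitness_bullet_block_after_py : String × String := ("Findings:\n- a\n- b\n\nrest", "Findings:")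

def Spec_bullet_block_after_py (text : String) (heading : String) (out : List String) : Prop := out = bullet_block_after_py_alt text heading
instance (text : String) (heading : String) (out : List String) : Decidable (Spec_bullet_block_after_py text heading out) := by unfold Spec_bullet_block_after_py; infer_instance

-- ===== CLAIM (what is proved, stated in full; the proofs are below) =====
def Claim_equal_bullet_block_after_py : Prop := ∀ (text : String) (heading : String), Dom_bullet_block_after_py text heading → Pre_bullet_block_after_py text heading → Spec_bullet_block_after_py text heading (bullet_block_after_py text heading)

-- ===== LEMMAS AND PROOFS =====

-- once the accumulator is nonempty, A's loop appends the bullet run and stops at the first non-bullet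
theorem bbaLoopA_phase2 (ls : List String) (acc : List String) (h : acc ≠ []) :
    bbaLoopA ls acc = acc ++ bbaTake (ls.map PySem.Str.strip) := by
  induction ls generalizing acc with
  | nil => simp [bbaLoopA, bbaTake]
  | cons raw rest ih =>
    simp only [bbaLoopA, List.map_cons, bbaTake]
    by_cases he : PySem.Str.strip raw = ""
    · have hb : PySem.Str.startswith (PySem.Str.strip raw) "- " = false := by
        rw [he]; decide
      rw [if_pos he, if_pos h, if_pos hb]
      simp
    · rw [if_neg he]
      by_cases hb : PySem.Str.startswith (PySem.Str.strip raw) "- " = false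
      · rw [if_pos hb, if_pos h, if_pos hb]
        simp
      · rw [if_neg hb, if_neg hb]
        rw [ih (acc ++ [PySem.Str.slice (PySem.Str.strip raw) (some 2) none]) (by simp)]
        simp
-- with an empty accumulator, A's loop is: drop non-bullet lines, then take the bullet run
theorem bbaLoopA_eq (ls : List String) :
    bbaLoopA ls [] = bbaTake (bbaDrop (ls.map PySem.Str.strip)) := by
  induction ls with
  | nil => simp [bbaLoopA, bbaDrop, bbaTake]
  | cons raw rest ih =>
    simp only [bbaLoopA, List.map_cons, bbaDrop]
    by_cases he : PySem.Str.strip raw = ""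
    · have hb : PySem.Str.startswith (PySem.Str.strip raw) "- " = false := by
        rw [he]; decide
      rw [if_pos he, if_neg (by simp : ¬ ([] : List String) ≠ []), if_pos hb]
      exact ih
    · rw [if_neg he]
      by_cases hb : PySem.Str.startswith (PySem.Str.strip raw) "- " = false
      · rw [if_pos hb, if_neg (by simp : ¬ ([] : List String) ≠ []), if_pos hb]
        exact ih
      · rw [if_neg hb, if_neg hb]
        rw [List.nil_append, bbaLoopA_phase2 rest [PySem.Str.slice (PySem.Str.strip raw) (some 2) none] (by simp)]
        simp only [bbaTake]
        rw [if_neg hb]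
        simp

-- ===== VERDICT (by name: the statement is the Claim_ definition above) =====
theorem bullet_block_after_py_spec : Claim_equal_bullet_block_after_py := by
  intro text heading _ _
  unfold Spec_bullet_block_after_py bullet_block_after_py bullet_block_after_py_alt
  by_cases hin : PySem.Str.isIn heading text = false
  · rw [if_pos hin, if_pos hin]
  · rw [if_neg hin, if_neg hin]
    exact bbaLoopA_eq _
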